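-- pv_equiv track=rewrite | github.com/austonnn/ucsd_bio_2 | bio 2 week 4/1.3.8.py | Convolution_Spectrum
-- ===== SOURCE A (Python) =====
-- def Convolution_Spectrum(Spectrum):
--     ans_list = []
--     # if Spectrum does not include a 0 in it，
--     # should add one to the following list.
--     # Be careful!
--     tmp_list = []
--     #Spectrum = sorted(Spectrum)
--     for item in Spectrum:
--         tmp_list.append(int(item))
--     #tmp_list.extend(Spectrum)
--     tmp_list = sorted(tmp_list)
--     for i in tmp_list:
--         for j in tmp_list:
--             if 56 <(i - j)<201:
--                 ans_list.append(i - j)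
--
--     return ans_list
-- ===== SOURCE B (Python) =====
-- # B: sort once, then for each i binary-search the contiguous window of valid j
-- # (i-201 < j < i-56) instead of scanning the whole list; same output order as A.
-- def _bisect_left(a, x):
--     lo, hi = 0, len(a)
--     while lo < hi:
--         mid = (lo + hi) // 2
--         if a[mid] < x:
--             lo = mid + 1
--         else:
--             hi = mid
--     return lo
--
-- def _bisect_right(a, x):
--     lo, hi = 0, len(a)
--     while lo < hi:
--         mid = (lo + hi) // 2
--         if x < a[mid]:
--             hi = mid
--         else:
--             lo = mid + 1
--     return lo
--
-- def Convolution_Spectrum(Spectrum):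
--     tmp = sorted(int(item) for item in Spectrum)
--     ans = []
--     for i in tmp:
--         lo = _bisect_right(tmp, i - 201)
--         hi = _bisect_left(tmp, i - 56)
--         ans += [i - j for j in tmp[lo:hi]]
--     return ans
-- ===== Notes on version B (the rewrite author's own statement) =====
-- stated objective: faster
-- what changed: Replaces the inner full scan of the sorted list by a binary-searched contiguous window (bisect_right on i-201, bisect_left on i-56) whose slice is mapped to differences, preserving the nested-loop output order.
import Mathlib
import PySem

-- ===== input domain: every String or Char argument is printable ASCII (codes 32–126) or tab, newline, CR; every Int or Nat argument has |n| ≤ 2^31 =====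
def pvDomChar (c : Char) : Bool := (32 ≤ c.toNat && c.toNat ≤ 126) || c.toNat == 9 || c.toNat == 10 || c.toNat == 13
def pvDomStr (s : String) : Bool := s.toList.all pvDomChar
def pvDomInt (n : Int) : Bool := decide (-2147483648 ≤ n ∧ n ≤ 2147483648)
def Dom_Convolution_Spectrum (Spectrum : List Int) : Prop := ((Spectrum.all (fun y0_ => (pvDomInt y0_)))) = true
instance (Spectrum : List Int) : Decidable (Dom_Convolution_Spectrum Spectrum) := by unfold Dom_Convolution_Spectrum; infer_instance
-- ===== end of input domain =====

-- B replaces A's inner full scan by a binary-searched contiguous window of the sorted list (faster).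

-- ===== PORT A =====
def Convolution_Spectrum (Spectrum : List Int) : List Int :=
  -- tmp_list.append(int(item)) : int() on an int is the identity
  let tmp := PySem.List.sorted (Spectrum.foldl (fun acc item => acc ++ [item]) []) (fun x => x)
  tmp.foldl (fun ans i =>
    tmp.foldl (fun ans j => if 56 < i - j ∧ i - j < 201 then ans ++ [i - j] else ans) ans) []

-- ===== PORT B =====
-- Source B's hand-written _bisect_left/_bisect_right are the stdlib bisect binary-search loops,
-- ported as PySem.List.bisectLeft / bisectRight (the same binary-search algorithm).
def Convolution_Spectrum_alt (Spectrum : List Int) : List Int :=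
  let tmp := PySem.List.sorted (Spectrum.map (fun item => item)) (fun x => x)
  tmp.foldl (fun ans i =>
    let lo := PySem.List.bisectRight tmp (i - 201)
    let hi := PySem.List.bisectLeft tmp (i - 56)
    ans ++ (PySem.List.slice tmp (some (lo : Int)) (some (hi : Int))).map (fun j => i - j)) []

-- ===== PRECONDITION & SPEC =====
def Spec_Convolution_Spectrum (Spectrum : List Int) (out : List Int) : Prop := out = Convolution_Spectrum_alt Spectrum
instance (Spectrum : List Int) (out : List Int) : Decidable (Spec_Convolution_Spectrum Spectrum out) := by unfold Spec_Convolution_Spectrum; infer_instance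

-- ===== CLAIM (what is proved, stated in full; the proofs are below) =====
def Claim_equal_Convolution_Spectrum : Prop := ∀ (Spectrum : List Int), Dom_Convolution_Spectrum Spectrum → Spec_Convolution_Spectrum Spectrum (Convolution_Spectrum Spectrum)

-- ===== LEMMAS AND PROOFS =====

-- A filter whose predicate holds exactly on the index window [lo, hi) of xs is the drop/take slice.
theorem filter_eq_window {xs : List Int} {p : Int → Bool} {lo hi : Nat}
    (hlh : lo ≤ hi) (hhl : hi ≤ xs.length)
    (hiff : ∀ (j : Nat) (hj : j < xs.length), p xs[j] = true ↔ (lo ≤ j ∧ j < hi)) :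
    xs.filter p = (xs.drop lo).take (hi - lo) := by
  have hx : xs = xs.take lo ++ ((xs.drop lo).take (hi - lo) ++ (xs.drop lo).drop (hi - lo)) := by
    simp
  have h1 : (xs.take lo).filter p = [] := by
    rw [List.filter_eq_nil_iff]
    intro a ha
    rw [List.mem_iff_getElem] at ha
    obtain ⟨j, hj, rfl⟩ := ha
    have hjb : j < lo ∧ j < xs.length := by
      have := hj; simp [List.length_take] at this; omega
    rw [List.getElem_take]
    intro hp
    have := (hiff j hjb.2).mp hp
    omega
  have h2 : ((xs.drop lo).take (hi - lo)).filter p = (xs.drop lo).take (hi - lo) := by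
    rw [List.filter_eq_self]
    intro a ha
    rw [List.mem_iff_getElem] at ha
    obtain ⟨j, hj, rfl⟩ := ha
    have hjb : j < hi - lo ∧ lo + j < xs.length := by
      have := hj; simp [List.length_take, List.length_drop] at this; omega
    rw [List.getElem_take, List.getElem_drop]
    exact (hiff (lo + j) hjb.2).mpr (by omega)
  have h3 : ((xs.drop lo).drop (hi - lo)).filter p = [] := by
    rw [List.drop_drop, List.filter_eq_nil_iff]
    intro a ha
    rw [List.mem_iff_getElem] at ha
    obtain ⟨j, hj, rfl⟩ := ha
    have hjx : lo + (hi - lo) + j < xs.length := by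
      have := hj; simp [List.length_drop] at this; omega
    rw [List.getElem_drop]
    intro hp
    have := (hiff _ hjx).mp hp
    omega
  conv_lhs => rw [hx]
  rw [List.filter_append, List.filter_append, h1, h2, h3]
  simp

theorem window_eq {tmp : List Int} (hs : tmp.Pairwise (fun a b => a ≤ b)) (i : Int) :
    tmp.filter (fun j => decide (56 < i - j ∧ i - j < 201)) =
      (tmp.drop (PySem.List.bisectRight tmp (i - 201))).take
        (PySem.List.bisectLeft tmp (i - 56) - PySem.List.bisectRight tmp (i - 201)) := by
  obtain ⟨hRle, hRlt, hRge⟩ := PySem.List.bisectRight_spec tmp (i - 201) hs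
  obtain ⟨hLle, hLlt, hLge⟩ := PySem.List.bisectLeft_spec tmp (i - 56) hs
  set lo := PySem.List.bisectRight tmp (i - 201) with hlo
  set hi := PySem.List.bisectLeft tmp (i - 56) with hhi
  have hlh : lo ≤ hi := by
    by_contra h
    have h' : hi < lo := by omega
    have hhx : hi < tmp.length := lt_of_lt_of_le h' hRle
    have h1 := hRlt hi hhx h'
    have h2 := hLge hi hhx (le_refl _)
    omega
  refine filter_eq_window hlh hLle ?_
  intro j hj
  constructor
  · intro hp
    simp only [decide_eq_true_eq] at hp
    constructor
    · by_contra h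
      have := hRlt j hj (by omega)
      omega
    · by_contra h
      have := hLge j hj (by omega)
      omega
  · rintro ⟨h1, h2⟩
    have hg := hRge j hj h1
    have hl := hLlt j hj h2
    simp only [decide_eq_true_eq]
    omega

theorem Convolution_Spectrum_spec : Claim_equal_Convolution_Spectrum := by
  intro Spectrum _
  have key : ∀ (tmp : List Int), tmp.Pairwise (fun a b => a ≤ b) →
      tmp.foldl (fun ans i =>
        tmp.foldl (fun ans j => if 56 < i - j ∧ i - j < 201 then ans ++ [i - j] else ans) ans) [] =
      tmp.foldl (fun ans i => ans ++
        (PySem.List.slice tmp (some ((PySem.List.bisectRight tmp (i - 201) : Nat) : Int))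
          (some ((PySem.List.bisectLeft tmp (i - 56) : Nat) : Int))).map (fun j => i - j)) [] := by
    intro tmp hs
    have hinner : (fun (ans : List Int) (i : Int) =>
        tmp.foldl (fun ans j => if 56 < i - j ∧ i - j < 201 then ans ++ [i - j] else ans) ans) =
        (fun ans i => ans ++
          (PySem.List.slice tmp (some ((PySem.List.bisectRight tmp (i - 201) : Nat) : Int))
            (some ((PySem.List.bisectLeft tmp (i - 56) : Nat) : Int))).map (fun j => i - j)) := by
      funext ans i
      rw [PySem.List.foldl_append_ite (fun j => 56 < i - j ∧ i - j < 201) (fun j => i - j)]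
      rw [PySem.List.slice_natCast, window_eq hs i]
    rw [hinner]
  have htmp : (Spectrum.foldl (fun acc item => acc ++ [item]) []) = Spectrum.map (fun item => item) := by
    rw [PySem.List.foldl_append_singleton_eq_self]
    simp
  simp only [Spec_Convolution_Spectrum, Convolution_Spectrum, Convolution_Spectrum_alt, htmp]
  exact key _ (PySem.List.sorted_pairwise _ _)

-- ===== VERDICT (by name: the statement is the Claim_ definition above) =====
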